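-- pv_equiv track=rewrite | github.com/Ankit-ICY/My-Python-DSA-Problems | CONTEST/VIsitarayTOMAxScore.py | solve
-- ===== SOURCE A (Python) =====
-- def solve(nums,k,ind,dp,prev):
--     if ind>=len(nums):
--         return nums[prev]
--
--
--     x = 0
--
--     if  ((nums[prev]%2==0 and nums[ind]%2==0 ) or (nums[prev] %2==1 and nums[ind] %2 == 1)) :
--         x1 = nums[prev]  + solve(nums,k,ind+1,dp,ind)
--         x2 = solve(nums,k,ind +1 ,dp,prev)
--         x = max(x1,x2)
--
--
--     elif ((nums[prev]%2==1 and nums[ind]%2==0 ) or (nums[prev] %2==0 and nums[ind] %2 == 1)):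
--         x1 =   (nums[prev]-k) +    solve(nums,k,ind+1,dp,ind)
--         x2 = solve(nums,k,ind+1,dp,prev)
--         x = max(x1,x2)
--
--
--     # else :
--     #     x = solve(nums,k,ind+1,dp,prev)
--
--
--
--     return x
-- ===== SOURCE B (Python) =====
-- def solve(nums, k, ind, dp, prev):
--     # Backward O(n) suffix DP instead of A's O(2^n) take/skip recursion:
--     # bE / bO = best value of a chain taking some element of the suffix seen so far,
--     # charged as if the previous element were even / odd (None = no element yet).
--     bE = bO = None
--     for v in reversed(nums[max(ind, 0):]):
--         p = v % 2
--         cont = bE if p == 0 else bO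
--         h = v + (cont if cont is not None and cont > 0 else 0)
--         cE = h - (k if p != 0 else 0)
--         cO = h - (k if p != 1 else 0)
--         bE = cE if bE is None or cE > bE else bE
--         bO = cO if bO is None or cO > bO else bO
--     s = bE if nums[prev] % 2 == 0 else bO
--     return nums[prev] + (s if s is not None and s > 0 else 0)
-- ===== Notes on version B (the rewrite author's own statement) =====
-- stated objective: faster
-- what changed: Replaced A's exponential take/skip recursion by a single backward O(n) suffix DP that keeps, for each parity of the previous element, the best chain value over the remaining suffix.
-- outside the precondition, e.g. on solve([3, 4], 1, -1, [], 0): A returns 11, B returns 9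
import Mathlib
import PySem

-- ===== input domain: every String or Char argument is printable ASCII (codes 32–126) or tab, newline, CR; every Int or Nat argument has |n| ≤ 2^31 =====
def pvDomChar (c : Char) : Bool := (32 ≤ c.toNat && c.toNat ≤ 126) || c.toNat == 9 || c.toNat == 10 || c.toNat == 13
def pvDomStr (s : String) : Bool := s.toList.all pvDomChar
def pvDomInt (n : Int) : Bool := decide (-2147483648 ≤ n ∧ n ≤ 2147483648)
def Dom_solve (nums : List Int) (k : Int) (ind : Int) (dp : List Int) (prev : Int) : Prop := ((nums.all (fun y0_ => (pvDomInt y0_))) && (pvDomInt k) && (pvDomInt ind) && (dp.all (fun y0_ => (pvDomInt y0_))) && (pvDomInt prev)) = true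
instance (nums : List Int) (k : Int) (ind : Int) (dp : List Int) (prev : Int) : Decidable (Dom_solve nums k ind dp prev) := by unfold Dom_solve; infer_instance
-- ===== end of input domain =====

-- B replaces A's O(2^n) take/skip recursion by a single backward O(n) suffix pass keeping,
-- for each parity of the previous element, the best chain value (objective: faster).

-- ===== PORT A =====
def solve (nums : List Int) (k : Int) (ind : Int) (dp : List Int) (prev : Int) : Int :=
  if _h : ind ≥ (nums.length : Int) then
    (PySem.List.pyGet? nums prev).getD 0
  else
    let np := (PySem.List.pyGet? nums prev).getD 0
    let ni := (PySem.List.pyGet? nums ind).getD 0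
    if (PySem.Int.mod np 2 = 0 ∧ PySem.Int.mod ni 2 = 0) ∨
       (PySem.Int.mod np 2 = 1 ∧ PySem.Int.mod ni 2 = 1) then
      max (np + solve nums k (ind + 1) dp ind) (solve nums k (ind + 1) dp prev)
    else if (PySem.Int.mod np 2 = 1 ∧ PySem.Int.mod ni 2 = 0) ∨
            (PySem.Int.mod np 2 = 0 ∧ PySem.Int.mod ni 2 = 1) then
      max ((np - k) + solve nums k (ind + 1) dp ind) (solve nums k (ind + 1) dp prev)
    else 0
termination_by ((nums.length : Int) - ind).toNat
decreasing_by all_goals omega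

-- ===== PORT B =====
-- `cont if cont is not None and cont > 0 else 0`
def pPart (o : Option Int) : Int :=
  match o with
  | none => 0
  | some v => if v > 0 then v else 0

-- `c if b is None or c > b else b`
def pushMax (b : Option Int) (c : Int) : Int :=
  match b with
  | none => c
  | some v => if c > v then c else v

-- one iteration of Source B's loop body (state (bE, bO), element v)
def bestStep (k : Int) (v : Int) (r : Option Int × Option Int) : Option Int × Option Int :=
  let p := PySem.Int.mod v 2
  let cont := if p = 0 then r.1 else r.2
  let h := v + pPart cont
  let cE := h - (if p ≠ 0 then k else 0)
  let cO := h - (if p ≠ 1 then k else 0)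
  (some (pushMax r.1 cE), some (pushMax r.2 cO))

def solve_alt (nums : List Int) (k : Int) (ind : Int) (dp : List Int) (prev : Int) : Int :=
  -- `nums[max(ind, 0):]` with a nonnegative start index is List.drop;
  -- `for v in reversed(...)` accumulating (bE, bO) is a right fold
  let r := (nums.drop (max ind 0).toNat).foldr (bestStep k) (none, none)
  let np := (PySem.List.pyGet? nums prev).getD 0
  np + pPart (if PySem.Int.mod np 2 = 0 then r.1 else r.2)

-- ===== PRECONDITION & SPEC =====
-- Pre_ excludes inputs where A raises IndexError (prev outside [-n, n)), and negative ind,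
-- where A's value (for -n ≤ ind < 0) is an accident of Python's negative-index wraparound
-- that lets it pick suffix elements a second time.
def Pre_solve (nums : List Int) (k : Int) (ind : Int) (dp : List Int) (prev : Int) : Prop :=
  0 ≤ ind ∧ -(nums.length : Int) ≤ prev ∧ prev < (nums.length : Int)
instance (nums : List Int) (k : Int) (ind : Int) (dp : List Int) (prev : Int) : Decidable (Pre_solve nums k ind dp prev) := by unfold Pre_solve; infer_instance

def pvWitness_solve : List Int × Int × Int × List Int × Int := ([1, 2, 4], 3, 0, [], 0)

def Spec_solve (nums : List Int) (k : Int) (ind : Int) (dp : List Int) (prev : Int) (out : Int) : Prop := out = solve_alt nums k ind dp prev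
instance (nums : List Int) (k : Int) (ind : Int) (dp : List Int) (prev : Int) (out : Int) : Decidable (Spec_solve nums k ind dp prev out) := by unfold Spec_solve; infer_instance

-- ===== CLAIM (what is proved, stated in full; the proofs are below) =====
def Claim_equal_solve : Prop := ∀ (nums : List Int) (k : Int) (ind : Int) (dp : List Int) (prev : Int), Dom_solve nums k ind dp prev → Pre_solve nums k ind dp prev → Spec_solve nums k ind dp prev (solve nums k ind dp prev)

-- ===== LEMMAS AND PROOFS =====

theorem pPart_pushMax (b : Option Int) (c np : Int) :
    np + pPart (some (pushMax b c)) = max (np + c) (np + pPart b) := by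
  rcases b with _ | v <;> simp only [pPart, pushMax] <;> split_ifs <;> omega

-- invariant: A's exhaustive recursion from index i equals nums[prev] plus the positive part
-- of B's best suffix-chain value for prev's parity
theorem solve_eq_best (nums : List Int) (k : Int) (dp : List Int) (i prev : Int) (hi : 0 ≤ i) :
    solve nums k i dp prev =
      (PySem.List.pyGet? nums prev).getD 0 +
        pPart (if PySem.Int.mod ((PySem.List.pyGet? nums prev).getD 0) 2 = 0
               then ((nums.drop i.toNat).foldr (bestStep k) (none, none)).1
               else ((nums.drop i.toNat).foldr (bestStep k) (none, none)).2) := by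
  by_cases h : i ≥ (nums.length : Int)
  · have hnil : nums.drop i.toNat = [] := List.drop_eq_nil_of_le (by omega)
    rw [solve, hnil]
    simp [h, pPart]
  · have ht : i.toNat < nums.length := by omega
    have hdrop : nums.drop i.toNat = nums[i.toNat] :: nums.drop (i.toNat + 1) :=
      List.drop_eq_getElem_cons ht
    have hsucc : (i + 1).toNat = i.toNat + 1 := by omega
    have hgi : (PySem.List.pyGet? nums i).getD 0 = nums[i.toNat] := by
      have hcast : PySem.List.pyGet? nums ((i.toNat : Nat) : Int) = nums[i.toNat]? :=
        PySem.List.pyGet?_natCast nums i.toNat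
      rw [Int.toNat_of_nonneg hi] at hcast
      rw [hcast, List.getElem?_eq_getElem ht]
      rfl
    have IH1 := solve_eq_best nums k dp (i + 1) i (by omega)
    have IH2 := solve_eq_best nums k dp (i + 1) prev (by omega)
    rw [hsucc] at IH1 IH2
    rw [solve, hdrop]
    simp only [h, dite_false, List.foldr_cons, hgi]
    rw [hgi] at IH1
    set np := (PySem.List.pyGet? nums prev).getD 0 with hnp
    set ni := nums[i.toNat] with hni
    set r := (nums.drop (i.toNat + 1)).foldr (bestStep k) (none, none) with hr
    rcases PySem.Int.mod_two_eq np with hp | hp <;>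
      rcases PySem.Int.mod_two_eq ni with hq | hq <;>
      simp only [hp, hq, IH1, IH2, bestStep] <;>
      simp only [if_true, if_false, ne_eq, not_true, not_false_iff,
        one_ne_zero, zero_ne_one, and_self, and_false, false_and, or_false, false_or] <;>
      rw [pPart_pushMax] <;> ring_nf
termination_by ((nums.length : Int) - i).toNat
decreasing_by all_goals omega

-- ===== VERDICT (by name: the statement is the Claim_ definition above) =====
theorem solve_spec : Claim_equal_solve := by
  intro nums k ind dp prev _ hpre
  obtain ⟨h0, -, -⟩ := hpre
  unfold Spec_solve solve_alt
  rw [max_eq_left h0]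
  exact solve_eq_best nums k dp ind prev h0
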